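-- pv_equiv track=rewrite | github.com/donRumata03/Literature_downloader | mylang.py | find_last_number
-- ===== SOURCE A (Python) =====
-- def find_last_number(string : str) -> int:
--     res = None
--     counter = len(string) - 1
--     for s in string[::-1]:
--         if s.isdigit():
--             res = s
--             break
--         counter -= 1
--     return counter
-- ===== SOURCE B (Python) =====
-- def find_last_number(string: str) -> int:
--     res = -1
--     for i, s in enumerate(string):
--         if s.isdigit():
--             res = i
--     return res
-- ===== Notes on version B (the rewrite author's own statement) =====
-- stated objective: simpler
-- what changed: Replaces the reverse scan with break and a hand-maintained decrementing counter by a single forward enumerate pass that overwrites a result initialised to -1 on each digit.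
import Mathlib
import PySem

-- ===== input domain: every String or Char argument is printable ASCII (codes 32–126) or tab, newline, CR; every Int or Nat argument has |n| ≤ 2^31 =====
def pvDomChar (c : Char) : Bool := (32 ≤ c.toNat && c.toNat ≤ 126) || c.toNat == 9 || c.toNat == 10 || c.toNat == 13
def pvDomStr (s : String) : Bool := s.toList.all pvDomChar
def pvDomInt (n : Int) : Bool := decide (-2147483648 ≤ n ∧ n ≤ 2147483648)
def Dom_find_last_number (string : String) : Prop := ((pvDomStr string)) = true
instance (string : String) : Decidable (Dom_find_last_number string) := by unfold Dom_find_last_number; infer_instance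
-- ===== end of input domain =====

-- B replaces A's reverse scan with break and decrementing counter by a forward enumerate
-- pass keeping the last digit index (objective: simpler).

-- ===== PORT A =====
-- the 'for s in string[::-1]' loop with its break; [::-1] is reversal (PySem.Chars.slice?_none_none_neg_one)
def pvLoopA : List Char → Int → Int
  | [], counter => counter
  | c :: rest, counter =>
      if PySem.Chars.isdigit c then counter else pvLoopA rest (counter - 1)

def find_last_number (string : String) : Int :=
  pvLoopA string.toList.reverse ((string.toList.length : Int) - 1)

-- ===== PORT B =====
def find_last_number_alt (string : String) : Int :=
  (PySem.List.enumerate string.toList 0).foldl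
    (fun res p => if PySem.Chars.isdigit p.2 then p.1 else res) (-1)

-- ===== PRECONDITION & SPEC =====
def Spec_find_last_number (string : String) (out : Int) : Prop := out = find_last_number_alt string
instance (string : String) (out : Int) : Decidable (Spec_find_last_number string out) := by unfold Spec_find_last_number; infer_instance

-- ===== CLAIM (what is proved, stated in full; the proofs are below) =====
def Claim_equal_find_last_number : Prop := ∀ (string : String), Dom_find_last_number string → Spec_find_last_number string (find_last_number string)

-- ===== LEMMAS AND PROOFS =====

theorem pvLoopA_append (l1 l2 : List Char) (k : Int) :
    pvLoopA (l1 ++ l2) k =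
      if l1.any PySem.Chars.isdigit then pvLoopA l1 k else pvLoopA l2 (k - l1.length) := by
  induction l1 generalizing k with
  | nil => simp [pvLoopA]
  | cons c t ih =>
      by_cases h : PySem.Chars.isdigit c = true
      · simp [pvLoopA, h]
      · simp only [List.cons_append, pvLoopA, h, ih, List.any_cons,
          Bool.false_or, List.length_cons]
        split_ifs with ht <;> first
          | rfl
          | exact congrArg _ (by push_cast; omega)
          | simp_all

theorem pvLoopA_no_digit (l : List Char) (k : Int)
    (h : l.any PySem.Chars.isdigit = false) : pvLoopA l k = k - l.length := by
  induction l generalizing k with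
  | nil => simp [pvLoopA]
  | cons c t ih =>
      simp only [List.any_cons, Bool.or_eq_false_iff] at h
      simp only [pvLoopA, h.1, ih _ h.2, List.length_cons]
      push_cast; omega

theorem pvFold_eq (xs : List Char) (off res : Int) :
    (PySem.List.enumerate xs off).foldl
        (fun r p => if PySem.Chars.isdigit p.2 then p.1 else r) res =
      if xs.any PySem.Chars.isdigit then pvLoopA xs.reverse (off + xs.length - 1) else res := by
  induction xs generalizing off res with
  | nil => simp [PySem.List.enumerate_nil]
  | cons c t ih =>
      simp only [PySem.List.enumerate_cons, List.foldl_cons, ih, List.any_cons,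
        List.reverse_cons, pvLoopA_append, List.any_reverse, List.length_cons,
        List.length_reverse]
      by_cases ht : t.any PySem.Chars.isdigit = true
      · simp only [ht, Bool.or_true, if_true]
        exact congrArg _ (by push_cast; omega)
      · simp only [ht, Bool.or_false]
        by_cases hc : PySem.Chars.isdigit c = true
        · simp only [hc, if_true, pvLoopA]
          exact congrArg _ (by push_cast; omega)
        · simp [hc]

-- ===== VERDICT (by name: the statement is the Claim_ definition above) =====
theorem find_last_number_spec : Claim_equal_find_last_number := by
  intro s _
  unfold Spec_find_last_number find_last_number find_last_number_alt
  rw [pvFold_eq]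
  by_cases h : s.toList.any PySem.Chars.isdigit = true
  · simp only [h, if_true]
    exact congrArg _ (by omega)
  · simp only [eq_false_of_ne_true h]
    rw [pvLoopA_no_digit _ _ (by simpa using eq_false_of_ne_true h)]
    simp
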